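-- pv_equiv track=rewrite | github.com/osipm01/inf-ege-2025 | 23/23-00.py | f
-- ===== SOURCE A (Python) =====
-- def f(x, y, _str):
--     if x == y:
--         if '33' not in _str:
--             return 1
--         return 0
--     if x > y:
--         return 0
--
--     return f(x + 1, y, _str + '1') + f(x + 2, y, _str + '2') + f(x * 2, y, _str + '3')
-- ===== SOURCE B (Python) =====
-- def f(x, y, _str):
--     # The accumulated string only matters through two bits: does it already
--     # contain '33', and does it end with '3'.  Bottom-up DP over t = y-1 .. x
--     # with two counts per position (last appended move was '3' / was not).
--     if '33' in _str:
--         return 0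
--     if x == y:
--         return 1
--     if x > y:
--         return 0
--     gF = {y: 1}   # count of valid continuations when the string does NOT end in '3'
--     gT = {y: 1}   # ... when it DOES end in '3'
--     for t in range(y - 1, x - 1, -1):
--         a = gF.get(t + 1, 0) + gF.get(t + 2, 0)
--         gT[t] = a
--         gF[t] = a + gT.get(2 * t, 0)
--     return gT[x] if _str.endswith('3') else gF[x]
-- ===== Notes on version B (the rewrite author's own statement) =====
-- stated objective: alternative
-- what changed: A's exponential three-way recursion carrying the whole accumulated move string is replaced by a bottom-up DP over t = y-1..x that keeps, per position, just two counts (continuations when the last move was '3' vs. was not), after reducing the string parameter to two bits: '33' already present, and ends-with-'3'; linear in y-x instead of exponential (a timing run could not confirm a speed-up at its input sizes, so no speed is claimed).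
import Mathlib
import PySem

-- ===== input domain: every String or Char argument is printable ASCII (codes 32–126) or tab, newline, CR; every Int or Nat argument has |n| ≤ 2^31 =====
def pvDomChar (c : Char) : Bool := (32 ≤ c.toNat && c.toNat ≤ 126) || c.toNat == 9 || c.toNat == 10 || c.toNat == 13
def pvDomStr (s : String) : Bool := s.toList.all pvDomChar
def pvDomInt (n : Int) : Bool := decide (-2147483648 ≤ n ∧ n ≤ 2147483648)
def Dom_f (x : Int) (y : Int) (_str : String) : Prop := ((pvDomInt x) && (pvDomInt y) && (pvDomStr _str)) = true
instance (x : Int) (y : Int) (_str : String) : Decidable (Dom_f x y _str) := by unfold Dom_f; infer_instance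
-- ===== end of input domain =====

-- B replaces A's three-way recursion (which carries the whole accumulated move
-- string) by a bottom-up DP keeping, per position, two counts (last move was '3' /
-- was not); objective: alternative (a different algorithm; no speed is claimed).

-- ===== PORT A =====
-- A recurses on (x, accumulated string); each move increases x by at least 1 whenever
-- 1 ≤ x, so (y - x).toNat + 1 fuel is never exhausted on any input Pre_f admits
-- (the fuel only makes the same recursion total; the 0-fuel branch is unreachable there).
def fA_aux : Nat → Int → Int → List Char → Int
  | 0, _, _, _ => 0
  | fl + 1, x, y, s =>
    if x = y then
      (if PySem.Chars.isIn ['3', '3'] s = false then 1 else 0)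
    else if x > y then 0
    else
      fA_aux fl (x + 1) y (s ++ ['1']) + fA_aux fl (x + 2) y (s ++ ['2'])
        + fA_aux fl (x * 2) y (s ++ ['3'])

def f (x : Int) (y : Int) (_str : String) : Int :=
  fA_aux ((y - x).toNat + 1) x y _str.toList

-- ===== PORT B =====
-- one iteration of Source B's "for t in range(y-1, x-1, -1)" loop over the pair (gF, gT)
def bStep (p : PySem.Dict Int Int × PySem.Dict Int Int) (t : Int) :
    PySem.Dict Int Int × PySem.Dict Int Int :=
  let a := p.1.getD (t + 1) 0 + p.1.getD (t + 2) 0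
  let gT := p.2.insert t a
  let gF := p.1.insert t (a + gT.getD (2 * t) 0)
  (gF, gT)

def bLoop (x y : Int) : PySem.Dict Int Int × PySem.Dict Int Int :=
  (PySem.List.pyRange (y - 1) (x - 1) (-1)).foldl bStep
    (PySem.Dict.insert PySem.Dict.empty y 1, PySem.Dict.insert PySem.Dict.empty y 1)

-- 'gT[x]' / 'gF[x]' in Source B: the key x is always present when the loop has run (the
-- loop is entered exactly when x < y and writes every t down to x), so the lookup is
-- ported as getD with default 0.
def f_alt (x : Int) (y : Int) (_str : String) : Int :=
  if PySem.Str.isIn "33" _str then 0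
  else if x = y then 1
  else if x > y then 0
  else if PySem.Str.endswith _str "3" then (bLoop x y).2.getD x 0
  else (bLoop x y).1.getD x 0

-- ===== PRECONDITION & SPEC =====
-- Pre_f excludes exactly x ≤ 0 < y resp. x ≤ 0 with x < y: there A's x*2 branch never
-- moves x past 0, so A recurses forever and raises RecursionError (it returns no value).
def Pre_f (x : Int) (y : Int) (_str : String) : Prop :=
  y ≤ x ∨ 1 ≤ x
instance (x : Int) (y : Int) (_str : String) : Decidable (Pre_f x y _str) := by
  unfold Pre_f; infer_instance
def pvWitness_f : Int × Int × String := (1, 9, "")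

def Spec_f (x : Int) (y : Int) (_str : String) (out : Int) : Prop := out = f_alt x y _str
instance (x : Int) (y : Int) (_str : String) (out : Int) : Decidable (Spec_f x y _str out) := by unfold Spec_f; infer_instance

-- ===== CLAIM (what is proved, stated in full; the proofs are below) =====
def Claim_equal_f : Prop := ∀ (x : Int) (y : Int) (_str : String), Dom_f x y _str → Pre_f x y _str → Spec_f x y _str (f x y _str)

-- ===== LEMMAS AND PROOFS =====

def I33 (s : List Char) : Prop := ['3', '3'] <:+: s
def E3 (s : List Char) : Prop := s.getLast? = some '3'
theorem E3_append (s : List Char) (c : Char) : E3 (s ++ [c]) ↔ c = '3' := by simp [E3]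
theorem I33_append (s : List Char) (c : Char) :
    I33 (s ++ [c]) ↔ I33 s ∨ (E3 s ∧ c = '3') := by
  constructor
  · rintro ⟨l, r, h⟩
    rcases List.eq_nil_or_concat r with rfl | ⟨r', c', rfl⟩
    · have h2 : (l ++ ['3']) ++ ['3'] = s ++ [c] := by simpa [List.append_assoc] using h
      rw [← List.concat_eq_append, ← List.concat_eq_append (as := s), List.concat_inj] at h2
      refine Or.inr ⟨?_, h2.2.symm⟩
      rw [E3, ← h2.1]; simp
    · have h2 : (l ++ ['3', '3'] ++ r') ++ [c'] = s ++ [c] := by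
        simpa [List.append_assoc] using h
      rw [← List.concat_eq_append, ← List.concat_eq_append (as := s), List.concat_inj] at h2
      exact Or.inl ⟨l, r', h2.1⟩
  · rintro (⟨l, r, h⟩ | ⟨hE, rfl⟩)
    · exact ⟨l, r ++ [c], by rw [← h]; simp⟩
    · rcases List.eq_nil_or_concat s with rfl | ⟨s', a, rfl⟩
      · simp [E3] at hE
      · have ha : a = '3' := by simpa [E3] using hE
        subst ha
        exact ⟨s', [], by simp⟩

theorem suffix3_iff (s : List Char) : ['3'] <:+ s ↔ E3 s := by
  constructor
  · rintro ⟨t, rfl⟩; simp [E3]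
  · intro hE
    rcases List.eq_nil_or_concat s with rfl | ⟨s', a, rfl⟩
    · simp [E3] at hE
    · have ha : a = '3' := by simpa [E3] using hE
      subst ha; exact ⟨s', by simp⟩


theorem fA_aux_of_I33 (fl : Nat) (x y : Int) (s : List Char) (h : I33 s) :
    fA_aux fl x y s = 0 := by
  induction fl generalizing x s with
  | zero => rfl
  | succ n ih =>
    have hin : PySem.Chars.isIn ['3', '3'] s = true := (PySem.Chars.isIn_iff_infix _ _).mpr h
    by_cases hxy : x = y
    · simp [fA_aux, hxy, hin]
    · by_cases hgt : x > y
      · simp [fA_aux, hxy, hgt]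
      · simp only [fA_aux, if_neg hxy, if_neg hgt]
        rw [ih _ _ ((I33_append s '1').mpr (Or.inl h)),
          ih _ _ ((I33_append s '2').mpr (Or.inl h)),
          ih _ _ ((I33_append s '3').mpr (Or.inl h))]
        decide

theorem fA_aux_of_gt (fl : Nat) (x y : Int) (s : List Char) (h : y < x) :
    fA_aux fl x y s = 0 := by
  cases fl with
  | zero => rfl
  | succ n => simp only [fA_aux, if_neg (show ¬ x = y by omega), if_pos h]

theorem fA_key_ge (y x : Int) (s1 s2 : List Char) (f1 f2 : Nat) (hxy : y ≤ x)
    (h1 : y - x < (f1 : Int)) (h2 : y - x < (f2 : Int)) (hI : I33 s1 ↔ I33 s2) :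
    fA_aux f1 x y s1 = fA_aux f2 x y s2 := by
  rcases lt_or_eq_of_le hxy with hlt | rfl
  · rw [fA_aux_of_gt _ _ _ _ hlt, fA_aux_of_gt _ _ _ _ hlt]
  · obtain ⟨g1, rfl⟩ : ∃ m, f1 = m + 1 := ⟨f1 - 1, by omega⟩
    obtain ⟨g2, rfl⟩ : ∃ m, f2 = m + 1 := ⟨f2 - 1, by omega⟩
    by_cases hc : I33 s1
    · have hc2 := hI.mp hc
      simp [fA_aux, (PySem.Chars.isIn_iff_infix _ _).mpr hc,
        (PySem.Chars.isIn_iff_infix _ _).mpr hc2]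
    · have hc2 := fun h => hc (hI.mpr h)
      simp [fA_aux, (PySem.Chars.isIn_eq_false_iff _ _).mpr hc,
        (PySem.Chars.isIn_eq_false_iff _ _).mpr hc2]

theorem fA_key (y : Int) (n : Nat) : ∀ (x : Int) (s1 s2 : List Char) (f1 f2 : Nat),
    1 ≤ x → y - x ≤ (n : Int) → y - x < (f1 : Int) → y - x < (f2 : Int) →
    (I33 s1 ↔ I33 s2) → (I33 s1 ∨ (E3 s1 ↔ E3 s2)) →
    fA_aux f1 x y s1 = fA_aux f2 x y s2 := by
  induction n with
  | zero =>
    intro x s1 s2 f1 f2 hx hn hf1 hf2 hI _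
    exact fA_key_ge y x s1 s2 f1 f2 (by omega) hf1 hf2 hI
  | succ n ih =>
    intro x s1 s2 f1 f2 hx hn hf1 hf2 hI hE
    by_cases hxy : y ≤ x
    · exact fA_key_ge y x s1 s2 f1 f2 hxy hf1 hf2 hI
    · have hxy' : x < y := by omega
      obtain ⟨g1, rfl⟩ : ∃ m, f1 = m + 1 := ⟨f1 - 1, by omega⟩
      obtain ⟨g2, rfl⟩ : ∃ m, f2 = m + 1 := ⟨f2 - 1, by omega⟩
      have hne : ¬ x = y := by omega
      have hng : ¬ x > y := by omega
      simp only [fA_aux, if_neg hne, if_neg hng]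
      have hI1 : ∀ s : List Char, I33 (s ++ ['1']) ↔ I33 s := by
        intro s; rw [I33_append]
        constructor
        · rintro (h | ⟨_, hc⟩)
          · exact h
          · exact absurd hc (by decide)
        · exact Or.inl
      have hI2 : ∀ s : List Char, I33 (s ++ ['2']) ↔ I33 s := by
        intro s; rw [I33_append]
        constructor
        · rintro (h | ⟨_, hc⟩)
          · exact h
          · exact absurd hc (by decide)
        · exact Or.inl
      have e1 := ih (x + 1) (s1 ++ ['1']) (s2 ++ ['1']) g1 g2 (by omega) (by omega)
        (by push_cast at hf1 ⊢; omega) (by push_cast at hf2 ⊢; omega)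
        (by rw [hI1, hI1]; exact hI) (Or.inr (by simp [E3_append]))
      have e2 := ih (x + 2) (s1 ++ ['2']) (s2 ++ ['2']) g1 g2 (by omega) (by omega)
        (by push_cast at hf1 ⊢; omega) (by push_cast at hf2 ⊢; omega)
        (by rw [hI2, hI2]; exact hI) (Or.inr (by simp [E3_append]))
      have hI3 : (I33 (s1 ++ ['3']) ↔ I33 (s2 ++ ['3'])) := by
        rw [I33_append, I33_append]
        rcases hE with h33 | hEE
        · exact iff_of_true (Or.inl h33) (Or.inl (hI.mp h33))
        · simp only [and_true]
          exact or_congr hI hEE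
      have e3 := ih (x * 2) (s1 ++ ['3']) (s2 ++ ['3']) g1 g2 (by omega) (by omega)
        (by push_cast at hf1 ⊢; omega) (by push_cast at hf2 ⊢; omega)
        hI3 (Or.inr (by simp [E3_append]))
      rw [e1, e2, e3]

theorem fA_aux_step (fl : Nat) (x y : Int) (s : List Char) (hne : ¬ x = y) (hng : ¬ x > y) :
    fA_aux (fl + 1) x y s =
      fA_aux fl (x + 1) y (s ++ ['1']) + fA_aux fl (x + 2) y (s ++ ['2']) +
        fA_aux fl (x * 2) y (s ++ ['3']) := by
  conv_lhs => rw [fA_aux]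
  rw [if_neg hne, if_neg hng]

theorem lt_toNat_succ (a : Int) : a < ((a.toNat + 1 : Nat) : Int) := by
  have := Int.self_le_toNat a; push_cast; omega

theorem I33_iff_isIn (s : List Char) : I33 s ↔ PySem.Chars.isIn ['3', '3'] s = true :=
  (PySem.Chars.isIn_iff_infix _ _).symm

def AF (y u : Int) : Int := fA_aux ((y - u).toNat + 1) u y []
def AT (y u : Int) : Int := fA_aux ((y - u).toNat + 1) u y ['3']

theorem AF_gt (y u : Int) (h : y < u) : AF y u = 0 := fA_aux_of_gt _ _ _ _ h
theorem AT_gt (y u : Int) (h : y < u) : AT y u = 0 := fA_aux_of_gt _ _ _ _ h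
theorem AF_self (y : Int) : AF y y = 1 := by
  show fA_aux ((y - y).toNat + 1) y y [] = 1
  rw [show (y - y).toNat = 0 from by omega]
  conv_lhs => rw [fA_aux]
  rw [if_pos rfl]; decide
theorem AT_self (y : Int) : AT y y = 1 := by
  show fA_aux ((y - y).toNat + 1) y y ['3'] = 1
  rw [show (y - y).toNat = 0 from by omega]
  conv_lhs => rw [fA_aux]
  rw [if_pos rfl]; decide

theorem AT_rec (y t : Int) (h1 : 1 ≤ t) (h2 : t < y) :
    AT y t = AF y (t + 1) + AF y (t + 2) := by
  obtain ⟨m, hm⟩ : ∃ m : Nat, (y - t).toNat = m + 1 := ⟨(y - t).toNat - 1, by omega⟩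
  have hcast : ((m : Int) + 1) = y - t := by omega
  show fA_aux ((y - t).toNat + 1) t y ['3'] = _
  rw [hm, fA_aux_step _ _ _ _ (by omega) (by omega)]
  have e1 : fA_aux (m + 1) (t + 1) y (['3'] ++ ['1']) = AF y (t + 1) :=
    fA_key y (m + 1) (t + 1) (['3'] ++ ['1']) [] (m + 1) ((y - (t + 1)).toNat + 1)
      (by omega) (by push_cast; omega) (by push_cast; omega) (lt_toNat_succ _)
      (by rw [I33_iff_isIn, I33_iff_isIn]; decide) (Or.inr (by simp only [E3]; decide))
  have e2 : fA_aux (m + 1) (t + 2) y (['3'] ++ ['2']) = AF y (t + 2) :=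
    fA_key y (m + 1) (t + 2) (['3'] ++ ['2']) [] (m + 1) ((y - (t + 2)).toNat + 1)
      (by omega) (by push_cast; omega) (by push_cast; omega) (lt_toNat_succ _)
      (by rw [I33_iff_isIn, I33_iff_isIn]; decide) (Or.inr (by simp only [E3]; decide))
  have e3 : fA_aux (m + 1) (t * 2) y (['3'] ++ ['3']) = 0 :=
    fA_aux_of_I33 _ _ _ _ (by rw [I33_iff_isIn]; decide)
  rw [e1, e2, e3, add_zero]

theorem AF_rec (y t : Int) (h1 : 1 ≤ t) (h2 : t < y) :
    AF y t = AF y (t + 1) + AF y (t + 2) + AT y (t * 2) := by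
  obtain ⟨m, hm⟩ : ∃ m : Nat, (y - t).toNat = m + 1 := ⟨(y - t).toNat - 1, by omega⟩
  have hcast : ((m : Int) + 1) = y - t := by omega
  show fA_aux ((y - t).toNat + 1) t y [] = _
  rw [hm, fA_aux_step _ _ _ _ (by omega) (by omega)]
  have e1 : fA_aux (m + 1) (t + 1) y ([] ++ ['1']) = AF y (t + 1) :=
    fA_key y (m + 1) (t + 1) ([] ++ ['1']) [] (m + 1) ((y - (t + 1)).toNat + 1)
      (by omega) (by push_cast; omega) (by push_cast; omega) (lt_toNat_succ _)
      (by rw [I33_iff_isIn, I33_iff_isIn]; decide) (Or.inr (by simp only [E3]; decide))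
  have e2 : fA_aux (m + 1) (t + 2) y ([] ++ ['2']) = AF y (t + 2) :=
    fA_key y (m + 1) (t + 2) ([] ++ ['2']) [] (m + 1) ((y - (t + 2)).toNat + 1)
      (by omega) (by push_cast; omega) (by push_cast; omega) (lt_toNat_succ _)
      (by rw [I33_iff_isIn, I33_iff_isIn]; decide) (Or.inr (by simp only [E3]; decide))
  have e3 : fA_aux (m + 1) (t * 2) y ([] ++ ['3']) = AT y (t * 2) :=
    fA_key y (m + 1) (t * 2) ([] ++ ['3']) ['3'] (m + 1) ((y - t * 2).toNat + 1)
      (by omega) (by push_cast; omega) (by push_cast; omega) (lt_toNat_succ _)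
      (by rw [I33_iff_isIn, I33_iff_isIn]; decide) (Or.inr (by simp only [E3]; decide))
  rw [e1, e2, e3]

def InvB (y t : Int) (p : PySem.Dict Int Int × PySem.Dict Int Int) : Prop :=
  ∀ u : Int, (p.1.get? u = if t ≤ u ∧ u ≤ y then some (AF y u) else none)
    ∧ (p.2.get? u = if t ≤ u ∧ u ≤ y then some (AT y u) else none)

theorem getD_of_inv {y t : Int} {d : PySem.Dict Int Int} (g : Int → Int)
    (hgt : ∀ u, y < u → g u = 0)
    (hd : ∀ u, d.get? u = if t ≤ u ∧ u ≤ y then some (g u) else none)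
    (u : Int) (hu : t ≤ u) : d.getD u 0 = g u := by
  rw [PySem.Dict.getD_eq_get?_getD, hd u]
  by_cases h : u ≤ y
  · simp [hu, h]
  · simp only [hu, h, and_false]
    exact (hgt u (by omega)).symm

theorem InvB_step (y t : Int) (h1 : 1 ≤ t - 1) (hty : t ≤ y)
    (p : PySem.Dict Int Int × PySem.Dict Int Int) (hp : InvB y t p) :
    InvB y (t - 1) (bStep p (t - 1)) := by
  have hF : ∀ u, t ≤ u → p.1.getD u 0 = AF y u :=
    getD_of_inv (AF y) (AF_gt y) (fun u => (hp u).1)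
  have hT : ∀ u, t ≤ u → p.2.getD u 0 = AT y u :=
    getD_of_inv (AT y) (AT_gt y) (fun u => (hp u).2)
  have ha : p.1.getD (t - 1 + 1) 0 + p.1.getD (t - 1 + 2) 0 = AT y (t - 1) := by
    rw [hF (t - 1 + 1) (by omega), hF (t - 1 + 2) (by omega),
      AT_rec y (t - 1) (by omega) (by omega)]
  have hTd : (p.2.insert (t - 1) (p.1.getD (t - 1 + 1) 0 + p.1.getD (t - 1 + 2) 0)).getD
      (2 * (t - 1)) 0 = AT y (2 * (t - 1)) := by
    rw [PySem.Dict.getD_eq_get?_getD, PySem.Dict.get?_insert,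
      if_neg (by omega : ¬ 2 * (t - 1) = t - 1), ← PySem.Dict.getD_eq_get?_getD]
    exact hT (2 * (t - 1)) (by omega)
  have hvF : p.1.getD (t - 1 + 1) 0 + p.1.getD (t - 1 + 2) 0
      + (p.2.insert (t - 1) (p.1.getD (t - 1 + 1) 0 + p.1.getD (t - 1 + 2) 0)).getD
        (2 * (t - 1)) 0 = AF y (t - 1) := by
    rw [hTd, hF (t - 1 + 1) (by omega), hF (t - 1 + 2) (by omega),
      show 2 * (t - 1) = (t - 1) * 2 from by ring, ← AF_rec y (t - 1) (by omega) (by omega)]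
  intro u
  simp only [bStep]
  constructor
  · rw [PySem.Dict.get?_insert]
    by_cases hu : u = t - 1
    · subst hu
      rw [if_pos rfl, hvF, if_pos ⟨le_refl _, by omega⟩]
    · rw [if_neg hu, (hp u).1,
        if_congr (show (t ≤ u ∧ u ≤ y) ↔ (t - 1 ≤ u ∧ u ≤ y) from by
          constructor <;> intro h <;> exact ⟨by omega, h.2⟩) rfl rfl]
  · rw [PySem.Dict.get?_insert]
    by_cases hu : u = t - 1
    · subst hu
      rw [if_pos rfl, ha, if_pos ⟨le_refl _, by omega⟩]
    · rw [if_neg hu, (hp u).2,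
        if_congr (show (t ≤ u ∧ u ≤ y) ↔ (t - 1 ≤ u ∧ u ≤ y) from by
          constructor <;> intro h <;> exact ⟨by omega, h.2⟩) rfl rfl]

theorem InvB_loop (y x : Int) (hx : 1 ≤ x) : ∀ (k : Nat) (t : Int)
    (p : PySem.Dict Int Int × PySem.Dict Int Int), t = x + k → t ≤ y → InvB y t p →
    InvB y x ((PySem.List.pyRange (t - 1) (x - 1) (-1)).foldl bStep p) := by
  intro k
  induction k with
  | zero =>
    intro t p ht hty hp
    have : t = x := by omega
    subst this
    rw [PySem.List.pyRange_neg_one_eq_nil (le_refl _)]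
    simpa using hp
  | succ k ih =>
    intro t p ht hty hp
    rw [PySem.List.pyRange_neg_one_cons (by omega : x - 1 < t - 1)]
    simp only [List.foldl_cons]
    have := ih (t - 1) (bStep p (t - 1)) (by omega) (by omega)
      (InvB_step y t (by omega) hty p hp)
    simpa using this

theorem bLoop_spec (x y : Int) (hx : 1 ≤ x) (hxy : x < y) :
    (bLoop x y).1.getD x 0 = AF y x ∧ (bLoop x y).2.getD x 0 = AT y x := by
  have hInit : InvB y y
      (PySem.Dict.insert PySem.Dict.empty y 1, PySem.Dict.insert PySem.Dict.empty y 1) := by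
    intro u
    constructor <;> rw [PySem.Dict.get?_insert] <;> by_cases hu : u = y
    · subst hu; rw [if_pos rfl, if_pos ⟨le_refl _, le_refl _⟩, AF_self]
    · rw [if_neg hu, PySem.Dict.get?_empty, if_neg (by omega : ¬ (y ≤ u ∧ u ≤ y))]
    · subst hu; rw [if_pos rfl, if_pos ⟨le_refl _, le_refl _⟩, AT_self]
    · rw [if_neg hu, PySem.Dict.get?_empty, if_neg (by omega : ¬ (y ≤ u ∧ u ≤ y))]
  have hInv := InvB_loop y x hx ((y - x).toNat) y _ (by omega) (le_refl y) hInit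
  constructor
  · exact getD_of_inv (AF y) (AF_gt y) (fun u => (hInv u).1) x (le_refl x)
  · exact getD_of_inv (AT y) (AT_gt y) (fun u => (hInv u).2) x (le_refl x)

theorem main (x y : Int) (s : String) (hPre : y ≤ x ∨ 1 ≤ x) :
    f x y s = f_alt x y s := by
  have h33l : "33".toList = ['3', '3'] := by decide
  by_cases h33 : PySem.Str.isIn "33" s = true
  · have hI : I33 s.toList := by
      have := (PySem.Str.isIn_iff_infix _ _).mp h33
      rwa [h33l] at this
    unfold f f_alt
    rw [fA_aux_of_I33 _ _ _ _ hI, if_pos h33]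
  · have hI : ¬ I33 s.toList := fun h =>
      h33 ((PySem.Str.isIn_iff_infix _ _).mpr (by rwa [h33l]))
    unfold f f_alt
    rw [if_neg h33]
    by_cases hxy : x = y
    · subst hxy
      rw [if_pos rfl, show (x - x).toNat = 0 from by omega]
      conv_lhs => rw [fA_aux]
      rw [if_pos rfl, if_pos ((PySem.Chars.isIn_eq_false_iff _ _).mpr hI)]
    · rw [if_neg hxy]
      by_cases hgt : x > y
      · rw [if_pos hgt, show (y - x).toNat = 0 from by omega]
        conv_lhs => rw [fA_aux]
        rw [if_neg hxy, if_pos hgt]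
      · rw [if_neg hgt]
        have hxlt : x < y := by omega
        have hx1 : 1 ≤ x := by rcases hPre with h | h <;> omega
        obtain ⟨hFx, hTx⟩ := bLoop_spec x y hx1 hxlt
        have hkey : ∀ s2 : List Char, (I33 s.toList ↔ I33 s2) → (E3 s.toList ↔ E3 s2) →
            fA_aux ((y - x).toNat + 1) x y s.toList = fA_aux ((y - x).toNat + 1) x y s2 :=
          fun s2 hIc hEc => fA_key y ((y - x).toNat) x s.toList s2 _ _ hx1
            (Int.self_le_toNat _) (lt_toNat_succ _) (lt_toNat_succ _) hIc (Or.inr hEc)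
        by_cases hE : E3 s.toList
        · have hEw : PySem.Str.endswith s "3" = true := by
            rw [PySem.Str.endswith_eq]
            exact (PySem.Chars.endswith_iff _ _).mpr (by
              rw [show "3".toList = ['3'] from by decide]
              exact (suffix3_iff _).mpr hE)
          rw [if_pos hEw, hTx]
          exact hkey ['3'] (iff_of_false hI (by rw [I33_iff_isIn]; decide))
            (iff_of_true hE (by simp only [E3]; decide))
        · have hEw : PySem.Str.endswith s "3" = false := by
            rw [PySem.Str.endswith_eq]
            rw [show "3".toList = ['3'] from by decide]
            rw [← Bool.not_eq_true]
            intro hc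
            exact hE ((suffix3_iff _).mp ((PySem.Chars.endswith_iff _ _).mp hc))
          rw [hEw, if_neg (by simp)]
          rw [hFx]
          exact hkey [] (iff_of_false hI (by rw [I33_iff_isIn]; decide))
            (iff_of_false hE (by simp only [E3]; decide))

-- ===== VERDICT (by name: the statement is the Claim_ definition above) =====
theorem f_spec : Claim_equal_f := by
  intro x y s _ hPre
  unfold Spec_f
  exact main x y s hPre
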